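-- pv_equiv track=rewrite | github.com/MillPRE/Programmers-Algorithm | 코딩 기초 트레이닝/A 강조하기-p181874/A 강조하기.py | solution
-- ===== SOURCE A (Python) =====
-- def solution(myString):
--     answer = ''
--     myString = list(myString)
--
--     for m in myString:
--         if m == 'a' or m == 'A':
--             answer += 'A'
--         else:
--             answer += m.lower()
--
--     return answer
-- ===== SOURCE B (Python) =====
-- def solution(myString):
--     return myString.lower().replace('a', 'A')
-- ===== Notes on version B (the rewrite author's own statement) =====
-- stated objective: idiomatic
-- what changed: Replaces the per-character loop with branch and repeated string concatenation by two whole-string built-in passes: lower() then replace('a','A').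
import Mathlib
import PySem

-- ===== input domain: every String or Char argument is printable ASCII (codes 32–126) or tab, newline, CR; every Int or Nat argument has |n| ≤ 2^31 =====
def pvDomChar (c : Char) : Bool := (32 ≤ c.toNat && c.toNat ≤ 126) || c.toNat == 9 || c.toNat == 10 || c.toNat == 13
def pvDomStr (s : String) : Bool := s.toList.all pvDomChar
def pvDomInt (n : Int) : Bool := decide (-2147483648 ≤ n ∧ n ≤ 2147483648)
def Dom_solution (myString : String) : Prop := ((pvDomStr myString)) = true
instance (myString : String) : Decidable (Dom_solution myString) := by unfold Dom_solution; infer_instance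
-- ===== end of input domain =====

-- B replaces A's per-character loop (branch + concatenation) by two whole-string passes: lower() then replace('a','A'); objective: idiomatic.

-- ===== PORT A =====
-- A iterates over the characters, appending 'A' for 'a'/'A' and m.lower() otherwise.
def solution (myString : String) : String :=
  String.ofList (myString.toList.foldl
    (fun answer m =>
      if m = 'a' ∨ m = 'A' then answer ++ ['A']
      else answer ++ [PySem.Chars.lowerChar m]) [])

-- ===== PORT B =====
def solution_alt (myString : String) : String :=
  PySem.Str.replace (PySem.Str.lower myString) "a" "A"

-- ===== PRECONDITION & SPEC =====
def Spec_solution (myString : String) (out : String) : Prop := out = solution_alt myString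
instance (myString : String) (out : String) : Decidable (Spec_solution myString out) := by unfold Spec_solution; infer_instance

-- ===== CLAIM (what is proved, stated in full; the proofs are below) =====
def Claim_equal_solution : Prop := ∀ (myString : String), Dom_solution myString → Spec_solution myString (solution myString)

-- ===== LEMMAS AND PROOFS =====

-- the single-character substitution replace('a','A') performs at each position
def pvRepA (c : Char) : Char := if c = 'a' then 'A' else c

-- replace with the one-character pattern 'a' is the map of pvRepA
theorem pv_go_spec : ∀ (fuel : Nat) (l acc : List Char), l.length ≤ fuel →
    PySem.Chars.replace.go ['a'] ['A'] fuel l acc = acc.reverse ++ l.map pvRepA := by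
  intro fuel
  induction fuel with
  | zero => intro l acc h; simp at h; simp [h, PySem.Chars.replace.go]
  | succ n ih =>
      intro l acc h
      cases l with
      | nil => simp [PySem.Chars.replace.go]
      | cons c t =>
          simp only [PySem.Chars.replace.go]
          by_cases hc : c = 'a'
          · simp [hc, List.isPrefixOf, ih t _ (by simpa using h), pvRepA]
          · simp [List.isPrefixOf, hc, ih t _ (by simpa using h), pvRepA]
            exact fun h' => absurd h'.symm hc

-- lowering a character that is neither 'a' nor 'A' cannot give 'a'
theorem pv_lower_ne_a (c : Char) (h : ¬(c = 'a' ∨ c = 'A')) :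
    PySem.Chars.lowerChar c ≠ 'a' := by
  simp only [PySem.Chars.lowerChar, PySem.Chars.isupper]
  split_ifs with hu
  · simp only [decide_eq_true_eq, Bool.and_eq_true] at hu
    intro heq
    have hA : ('A' : Char).toNat ≤ c.toNat := hu.1
    have hZ : c.toNat ≤ ('Z' : Char).toNat := hu.2
    have h65 : (65:Nat) ≤ c.toNat := by simpa using hA
    have h90 : c.toNat ≤ 90 := by simpa using hZ
    have hv : (c.toNat + 32).isValidChar := Or.inl (by omega)
    have ht : (Char.ofNat (c.toNat + 32)).toNat = c.toNat + 32 := by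
      rw [Char.toNat_ofNat, if_pos hv]
    rw [heq] at ht
    have h97 : c.toNat = 65 := by
      have : ('a' : Char).toNat = 97 := by decide
      omega
    have h2 := Char.ofNat_toNat c
    rw [h97] at h2
    exact h (Or.inr (by rw [← h2]))
  · intro heq; exact h (Or.inl heq)

-- the per-character functions of the two programs agree
theorem pv_char_eq (m : Char) :
    (if m = 'a' ∨ m = 'A' then 'A' else PySem.Chars.lowerChar m)
      = pvRepA (PySem.Chars.lowerChar m) := by
  by_cases h : m = 'a' ∨ m = 'A'
  · rcases h with h | h <;> subst h <;> decide
  · simp [h, pvRepA, pv_lower_ne_a m h]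

-- ===== VERDICT (by name: the statement is the Claim_ definition above) =====
theorem solution_spec : Claim_equal_solution := by
  intro s _
  unfold Spec_solution solution solution_alt
  apply String.toList_inj.mp
  rw [PySem.Str.toList_replace, PySem.Str.toList_lower]
  have hB : PySem.Chars.replace (PySem.Chars.lower s.toList) "a".toList "A".toList
      = (PySem.Chars.lower s.toList).map pvRepA := by
    show PySem.Chars.replace (PySem.Chars.lower s.toList) ['a'] ['A'] = _
    simp only [PySem.Chars.replace, List.isEmpty]
    exact pv_go_spec _ _ [] le_rfl
  rw [hB]
  have hA : String.toList (String.ofList (s.toList.foldl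
      (fun answer m => if m = 'a' ∨ m = 'A' then answer ++ ['A']
        else answer ++ [PySem.Chars.lowerChar m]) []))
      = s.toList.map (fun m => if m = 'a' ∨ m = 'A' then 'A' else PySem.Chars.lowerChar m) := by
    rw [String.toList_ofList]
    rw [show (fun answer m => if m = 'a' ∨ m = 'A' then answer ++ ['A']
        else answer ++ [PySem.Chars.lowerChar m])
      = (fun (answer : List Char) m => answer ++
          [if m = 'a' ∨ m = 'A' then 'A' else PySem.Chars.lowerChar m]) from by
        funext a m; split_ifs <;> rfl]
    simpa using PySem.List.foldl_append_singleton_eq_map (fun m => if m = 'a' ∨ m = 'A' then 'A' else PySem.Chars.lowerChar m) s.toList []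
  rw [hA, PySem.Chars.lower, List.map_map]
  exact List.map_congr_left (fun m _ => pv_char_eq m)
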